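-- pv_equiv track=rewrite | github.com/namera45/Infomatrix_python_week1 | q6.py | find_chars_with_frequency_less_than_2
-- ===== SOURCE A (Python) =====
-- def find_chars_with_frequency_less_than_2(input_string):
--     char_frequency = {}
--     for char in input_string:
--         if char in char_frequency:
--             char_frequency[char] += 1
--         else:
--             char_frequency[char] = 1
--
--     result = [char for char, freq in char_frequency.items() if freq < 2]
--     return result
-- ===== SOURCE B (Python) =====
-- def find_chars_with_frequency_less_than_2(input_string):
--     return [c for c in input_string if input_string.count(c) == 1]
-- ===== Notes on version B (the rewrite author's own statement) =====
-- stated objective: idiomatic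
-- what changed: Replaced the build-a-frequency-dict-then-filter-its-items two-pass algorithm with a single comprehension over the string that keeps each character whose total occurrence count (via str.count) is exactly 1; no frequency table is maintained.
import Mathlib
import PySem

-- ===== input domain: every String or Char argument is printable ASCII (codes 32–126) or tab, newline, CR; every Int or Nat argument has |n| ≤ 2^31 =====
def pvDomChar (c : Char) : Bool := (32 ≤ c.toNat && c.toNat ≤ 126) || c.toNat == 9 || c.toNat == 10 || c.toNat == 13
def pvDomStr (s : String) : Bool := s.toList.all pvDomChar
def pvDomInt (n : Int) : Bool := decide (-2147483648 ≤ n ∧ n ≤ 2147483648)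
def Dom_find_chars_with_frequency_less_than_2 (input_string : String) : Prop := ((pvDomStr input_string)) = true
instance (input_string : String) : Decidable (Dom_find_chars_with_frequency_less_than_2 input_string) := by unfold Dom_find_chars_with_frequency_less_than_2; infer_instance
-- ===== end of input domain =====

-- B replaces A's count-into-a-dict-then-filter-items two-pass algorithm by a single
-- comprehension keeping each character whose str.count is exactly 1 (no frequency table);
-- objective: more idiomatic (not faster).

-- ===== PORT A =====
def find_chars_with_frequency_less_than_2 (input_string : String) : List String :=
  let char_frequency :=
    input_string.toList.foldl
      (fun d char =>
        if d.contains char then d.insert char (d.getD char 0 + 1)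
        else d.insert char 1)
      (PySem.Dict.empty : PySem.Dict Char Int)
  (char_frequency.items.filter (fun p => p.2 < 2)).map (fun p => String.ofList [p.1])

-- ===== PORT B =====
def find_chars_with_frequency_less_than_2_alt (input_string : String) : List String :=
  (input_string.toList.filter
      (fun c => PySem.Str.count input_string (String.ofList [c]) == 1)).map
    (fun c => String.ofList [c])

-- ===== PRECONDITION & SPEC =====
def Spec_find_chars_with_frequency_less_than_2 (input_string : String) (out : List String) : Prop := out = find_chars_with_frequency_less_than_2_alt input_string
instance (input_string : String) (out : List String) : Decidable (Spec_find_chars_with_frequency_less_than_2 input_string out) := by unfold Spec_find_chars_with_frequency_less_than_2; infer_instance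

-- ===== CLAIM (what is proved, stated in full; the proofs are below) =====
def Claim_equal_find_chars_with_frequency_less_than_2 : Prop := ∀ (input_string : String), Dom_find_chars_with_frequency_less_than_2 input_string → Spec_find_chars_with_frequency_less_than_2 input_string (find_chars_with_frequency_less_than_2 input_string)

-- ===== LEMMAS AND PROOFS =====

-- Python's s.count(c) for a single character c is the per-character count.
theorem countGo_singleton (c : Char) :
    ∀ (fuel : Nat) (l : List Char) (acc : Nat), l.length ≤ fuel →
      PySem.Chars.count.go [c] fuel l acc = acc + l.count c := by
  intro fuel
  induction fuel with
  | zero =>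
    intro l acc h
    cases l with
    | nil => simp [PySem.Chars.count.go]
    | cons x t => simp at h
  | succ n ih =>
    intro l acc h
    cases l with
    | nil => simp [PySem.Chars.count.go]
    | cons x t =>
      by_cases hx : c = x
      · subst hx
        simp only [PySem.Chars.count.go, List.isPrefixOf, beq_self_eq_true, Bool.true_and,
          if_true, List.length_singleton, List.drop_one, List.tail_cons]
        rw [ih t (acc + 1) (by simp only [List.length_cons] at h; omega)]
        rw [List.count_cons]
        simp
        omega
      · have hpre : [c].isPrefixOf (x :: t) = false := by
          show ((c == x) && List.isPrefixOf [] t) = false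
          simp [hx]
        simp only [PySem.Chars.count.go, hpre]
        rw [ih t acc (by simp only [List.length_cons] at h; omega)]
        rw [List.count_cons]
        have hcxf : (x == c) = false := beq_eq_false_iff_ne.mpr (fun h' => hx h'.symm)
        simp [hcxf]

theorem count_singleton (l : List Char) (c : Char) :
    PySem.Chars.count l [c] = l.count c := by
  simp only [PySem.Chars.count, List.isEmpty_cons, Bool.false_eq_true, if_false]
  simpa using countGo_singleton c l.length l 0 le_rfl

theorem getD_zero_of_not_contains (d : PySem.Dict Char Int) (c : Char)
    (h : d.contains c = false) : d.getD c 0 = 0 := by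
  have hnone : List.find? (fun p => p.1 == c) d.items = none := by
    rw [List.find?_eq_none]
    intro p hp
    have h' := h
    simp only [PySem.Dict.contains] at h'
    rw [Bool.eq_false_iff, Ne, List.any_eq_true] at h'
    simp only [not_exists, not_and] at h'
    exact h' p hp
  simp [PySem.Dict.getD, PySem.Dict.get?, hnone]

theorem foldA_eq_counter (l : List Char) :
    l.foldl
      (fun d char =>
        if d.contains char then d.insert char (d.getD char 0 + 1)
        else d.insert char 1)
      (PySem.Dict.empty : PySem.Dict Char Int) = PySem.Dict.counter l := by
  rw [show (fun (d : PySem.Dict Char Int) char =>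
        if d.contains char then d.insert char (d.getD char 0 + 1)
        else d.insert char 1)
      = (fun d char => d.insert char (d.getD char 0 + 1)) from by
    funext d c
    by_cases h : d.contains c = true
    · simp [h]
    · simp only [Bool.not_eq_true] at h
      rw [if_neg (by simp [h]), getD_zero_of_not_contains d c h]
      norm_num]
  exact PySem.Dict.foldl_insert_getD_add_one_eq_counter l

-- filtering the first-occurrence dedup equals filtering the list itself,
-- provided the predicate only holds on characters occurring at most once
theorem filter_ofList_eq (l : List Char) (p : Char → Bool)
    (h : ∀ x, p x = true → l.count x ≤ 1) :
    List.filter p (PySem.Set.ofList l) = List.filter p l := by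
  induction l with
  | nil => simp [PySem.Set.ofList, PySem.Set.empty]
  | cons x xs ih =>
    rw [PySem.Set.ofList_cons]
    by_cases hp : p x = true
    · have hcx : xs.count x = 0 := by
        have := h x hp
        rw [List.count_cons] at this
        simp at this
        omega
      have hnm : x ∉ PySem.Set.ofList xs := by
        rw [PySem.Set.mem_ofList]
        exact List.count_eq_zero.mp hcx
      have hdisc : (PySem.Set.ofList xs).discard x = PySem.Set.ofList xs := by
        simp only [PySem.Set.discard]
        rw [List.filter_eq_self]
        intro y hy
        simp only [Bool.not_eq_eq_eq_not, Bool.not_true, beq_eq_false_iff_ne]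
        exact fun he => hnm (he ▸ hy)
      rw [hdisc, List.filter_cons_of_pos hp, List.filter_cons_of_pos hp,
        ih (fun y hy => le_trans (by rw [List.count_cons]; omega) (h y hy))]
    · have hp' : p x = false := by simpa using hp
      have hdf : List.filter p ((PySem.Set.ofList xs).discard x)
          = List.filter p (PySem.Set.ofList xs) := by
        simp only [PySem.Set.discard, List.filter_filter]
        apply List.filter_congr
        intro y _
        by_cases hpy : p y = true
        · have : y ≠ x := fun he => by rw [he] at hpy; exact absurd hpy (by simp [hp'])
          simp [hpy, this]
        · simp [Bool.not_eq_true] at hpy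
          simp [hpy]
      rw [List.filter_cons_of_neg (by simp [hp']), hdf, List.filter_cons_of_neg (by simp [hp']),
        ih (fun y hy => le_trans (by rw [List.count_cons]; omega) (h y hy))]

-- ===== VERDICT (by name: the statement is the Claim_ definition above) =====
theorem find_chars_with_frequency_less_than_2_spec : Claim_equal_find_chars_with_frequency_less_than_2 := by
  intro s _
  unfold Spec_find_chars_with_frequency_less_than_2
  unfold find_chars_with_frequency_less_than_2 find_chars_with_frequency_less_than_2_alt
  simp only [foldA_eq_counter, PySem.Dict.items_counter, List.filter_map, List.map_map]
  have hcnt : ∀ c : Char, PySem.Str.count s (String.ofList [c]) = s.toList.count c := by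
    intro c
    simp [PySem.Str.count, count_singleton]
  have hfc : List.filter ((fun (p : Char × Int) => decide (p.2 < 2)) ∘
        fun k => (k, (s.toList.count k : Int))) (PySem.Set.ofList s.toList)
      = List.filter (fun c => PySem.Str.count s (String.ofList [c]) == 1)
          (PySem.Set.ofList s.toList) := by
    apply List.filter_congr
    intro y hy
    have hmem : y ∈ s.toList := (PySem.Set.mem_ofList _ _).mp hy
    have h1 : 1 ≤ s.toList.count y := List.one_le_count_iff.mpr hmem
    simp only [Function.comp, hcnt]
    by_cases h2 : s.toList.count y = 1
    · simp [h2]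
    · have : ¬ ((s.toList.count y : Int) < 2) := by
        omega
      simp [this, h2]
  rw [hfc, filter_ofList_eq s.toList _ (by
    intro x hx
    simp only [hcnt, beq_iff_eq] at hx
    omega)]
  simp [Function.comp]
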